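-- pv_equiv track=rewrite | github.com/vusec/safefetch-ae | playground/paper/scripts/generate_plots.py | get_config_opts
-- ===== SOURCE A (Python) =====
-- def get_config_opts(configs):
--     initial_options = [0, 0 , 0]
--     for config in configs:
--       if ("whitelist" in config):
--          initial_options[1] = 1
--       if ("safefetch" in config):
--          initial_options[0] = 1
--       if ("midas" in config):
--          initial_options[2] = 1
--     return initial_options
-- ===== SOURCE B (Python) =====
-- def get_config_opts(configs):
--     safefetch = int(any("safefetch" in c for c in configs))
--     whitelist = int(any("whitelist" in c for c in configs))
--     midas = int(any("midas" in c for c in configs))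
--     return [safefetch, whitelist, midas]
-- ===== Notes on version B (the rewrite author's own statement) =====
-- stated objective: idiomatic
-- what changed: Replaces the single flag-mutating loop with three independent short-circuiting any() reductions, one per substring, returned directly as the list.
import Mathlib
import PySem

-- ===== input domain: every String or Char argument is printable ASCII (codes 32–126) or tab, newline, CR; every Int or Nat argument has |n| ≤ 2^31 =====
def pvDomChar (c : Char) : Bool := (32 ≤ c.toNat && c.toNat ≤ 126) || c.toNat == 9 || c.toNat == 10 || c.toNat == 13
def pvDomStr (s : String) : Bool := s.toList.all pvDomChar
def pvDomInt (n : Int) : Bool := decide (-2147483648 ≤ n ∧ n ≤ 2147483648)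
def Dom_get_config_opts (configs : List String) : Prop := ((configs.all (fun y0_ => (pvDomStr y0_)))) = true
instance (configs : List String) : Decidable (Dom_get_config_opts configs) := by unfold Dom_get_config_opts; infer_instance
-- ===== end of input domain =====

-- B replaces A's single flag-mutating loop by three independent any-scans, one per substring (idiomatic decomposition).


-- ===== PORT A =====
-- state is (options[0], options[1], options[2]); the loop body mutates it in place
def stepA (o : Int × Int × Int) (config : String) : Int × Int × Int :=
  let o := if PySem.Str.isIn "whitelist" config then (o.1, 1, o.2.2) else o
  let o := if PySem.Str.isIn "safefetch" config then (1, o.2.1, o.2.2) else o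
  let o := if PySem.Str.isIn "midas" config then (o.1, o.2.1, 1) else o
  o

def get_config_opts (configs : List String) : List Int :=
  let st := configs.foldl stepA (0, 0, 0)
  [st.1, st.2.1, st.2.2]

-- ===== PORT B =====
def get_config_opts_alt (configs : List String) : List Int :=
  let safefetch : Int := if configs.any (fun c => PySem.Str.isIn "safefetch" c) then 1 else 0
  let whitelist : Int := if configs.any (fun c => PySem.Str.isIn "whitelist" c) then 1 else 0
  let midas : Int := if configs.any (fun c => PySem.Str.isIn "midas" c) then 1 else 0
  [safefetch, whitelist, midas]

-- ===== PRECONDITION & SPEC =====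
def Spec_get_config_opts (configs : List String) (out : List Int) : Prop := out = get_config_opts_alt configs
instance (configs : List String) (out : List Int) : Decidable (Spec_get_config_opts configs out) := by unfold Spec_get_config_opts; infer_instance

-- ===== CLAIM (what is proved, stated in full; the proofs are below) =====
def Claim_equal_get_config_opts : Prop := ∀ (configs : List String), Dom_get_config_opts configs → Spec_get_config_opts configs (get_config_opts configs)

-- ===== LEMMAS AND PROOFS =====
theorem stepA_eq (s w m : Int) (c : String) :
    stepA (s, w, m) c
    = ((if PySem.Str.isIn "safefetch" c then 1 else s),
       (if PySem.Str.isIn "whitelist" c then 1 else w),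
       (if PySem.Str.isIn "midas" c then 1 else m)) := by
  unfold stepA
  split_ifs <;> rfl

theorem get_config_opts_foldl (l : List String) (s w m : Int) :
    l.foldl stepA (s, w, m)
    = ((if l.any (fun c => PySem.Str.isIn "safefetch" c) then 1 else s),
       (if l.any (fun c => PySem.Str.isIn "whitelist" c) then 1 else w),
       (if l.any (fun c => PySem.Str.isIn "midas" c) then 1 else m)) := by
  induction l generalizing s w m with
  | nil => simp
  | cons c l ih =>
    rw [List.foldl_cons, stepA_eq, ih]
    simp only [List.any_cons, Prod.mk.injEq]
    refine ⟨?_, ?_, ?_⟩ <;> split_ifs <;> simp_all only [Bool.or_eq_true, not_or] <;> tauto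

-- ===== VERDICT (by name: the statement is the Claim_ definition above) =====
theorem get_config_opts_spec : Claim_equal_get_config_opts := by
  intro configs _
  show get_config_opts configs = get_config_opts_alt configs
  unfold get_config_opts get_config_opts_alt
  rw [get_config_opts_foldl]
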